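-- pv_equiv track=rewrite | github.com/aliffadillah/mbg-research | transformer_model/nutrition_estimator.py | get_doneness_profile
-- ===== SOURCE A (Python) =====
-- from typing import Any, Dict, List, Optional, Tuple
--
-- TYPO_FIXES: Dict[str, str] = {
-- 	"koll": "kol",
-- }
--
-- COOKED_STAPLES = {
-- 	"nasi",
-- 	"telur",
-- 	"tahu",
-- 	"tempe",
-- 	"ayam",
-- 	"ikan",
-- 	"daging",
-- 	"mie",
-- 	"bakso",
-- }
--
-- RAW_FOODS = {
-- 	"buah",
-- 	"fruit",
-- 	"salad",
-- 	"pisang",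
-- 	"apel",
-- 	"jeruk",
-- 	"mangga",
-- 	"anggur",
-- 	"semangka",
-- 	"melon",
-- 	"pepaya",
-- 	"nanas",
-- 	"stroberi",
-- 	"jambu",
-- 	"salak",
-- 	"kelengkeng",
-- 	"leci",
-- 	"rambutan",
-- 	"sirsak",
-- }
--
-- LOW_BROWN_HINTS = {
-- 	"rebus",
-- 	"kukus",
-- 	"kuah",
-- 	"sop",
-- 	"soto",
-- 	"sayur",
-- 	"tumis",
-- 	"semur",
-- }
--
-- HIGH_BROWN_HINTS = {
-- 	"goreng",
-- 	"bakar",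
-- 	"panggang",
-- 	"crispy",
-- 	"krispi",
-- 	"grill",
-- 	"roast",
-- }
--
-- def normalize_label(label: str) -> str:
-- 	key = label.strip().lower().replace("_", " ").replace("-", " ")
-- 	words = [TYPO_FIXES.get(word, word) for word in key.split()]
-- 	return " ".join(words)
--
-- def get_doneness_profile(label: str) -> str:
-- 	words = normalize_label(label).split()
-- 	if any(word in RAW_FOODS for word in words):
-- 		return "raw_ok"
-- 	if any(word in HIGH_BROWN_HINTS for word in words):
-- 		return "high_brown"
-- 	if any(word in LOW_BROWN_HINTS for word in words):
-- 		return "light_cooked"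
-- 	if any(word in COOKED_STAPLES for word in words):
-- 		return "light_cooked"
-- 	return "default"
-- ===== SOURCE B (Python) =====
-- from typing import Dict
--
-- TYPO_FIXES: Dict[str, str] = {
--     "koll": "kol",
-- }
--
-- # One unified table: keyword -> priority rank (lower = higher priority).
-- # 0 = raw food, 1 = high-browning hint, 2 = low-browning hint, 3 = cooked staple.
-- KEYWORD_RANK: Dict[str, int] = {
--     "buah": 0, "fruit": 0, "salad": 0, "pisang": 0, "apel": 0, "jeruk": 0,
--     "mangga": 0, "anggur": 0, "semangka": 0, "melon": 0, "pepaya": 0,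
--     "nanas": 0, "stroberi": 0, "jambu": 0, "salak": 0, "kelengkeng": 0,
--     "leci": 0, "rambutan": 0, "sirsak": 0,
--     "goreng": 1, "bakar": 1, "panggang": 1, "crispy": 1, "krispi": 1,
--     "grill": 1, "roast": 1,
--     "rebus": 2, "kukus": 2, "kuah": 2, "sop": 2, "soto": 2, "sayur": 2,
--     "tumis": 2, "semur": 2,
--     "nasi": 3, "telur": 3, "tahu": 3, "tempe": 3, "ayam": 3, "ikan": 3,
--     "daging": 3, "mie": 3, "bakso": 3,
-- }
--
--
-- def normalize_label(label: str) -> str: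
--     key = label.strip().lower().replace("_", " ").replace("-", " ")
--     words = [TYPO_FIXES.get(word, word) for word in key.split()]
--     return " ".join(words)
--
--
-- def get_doneness_profile(label: str) -> str:
--     best = 4
--     for word in normalize_label(label).split():
--         best = min(best, KEYWORD_RANK.get(word, 4))
--     return ("raw_ok" if best == 0 else
--             "high_brown" if best == 1 else
--             "light_cooked" if best <= 3 else
--             "default")
-- ===== Notes on version B (the rewrite author's own statement) =====
-- stated objective: idiomatic
-- what changed: Replaces four priority-ordered set-membership scans over the word list with a single keyword->rank table and one min-tracking pass, mapping the best rank to its category name.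
import Mathlib
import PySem

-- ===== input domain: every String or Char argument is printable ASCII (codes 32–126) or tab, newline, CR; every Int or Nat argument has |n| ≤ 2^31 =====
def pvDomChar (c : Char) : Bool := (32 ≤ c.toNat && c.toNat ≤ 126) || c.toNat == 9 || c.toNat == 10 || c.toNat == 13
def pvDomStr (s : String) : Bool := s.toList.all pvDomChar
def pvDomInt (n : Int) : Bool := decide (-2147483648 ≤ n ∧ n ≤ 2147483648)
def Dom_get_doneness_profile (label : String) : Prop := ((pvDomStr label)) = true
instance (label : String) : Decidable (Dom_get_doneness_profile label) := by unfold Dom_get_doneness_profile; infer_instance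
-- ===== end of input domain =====

-- B replaces A's four priority-ordered set-membership scans with one keyword→rank
-- table and a single min-tracking pass (idiomatic table-driven classification).

-- ===== PORT A =====
def pvTYPO : PySem.Dict String String := PySem.Dict.ofList [("koll", "kol")]

-- Python set literals; only membership is used, which is exact on the distinct-element list.
def pvRAW : PySem.Set String := PySem.Set.ofList
  ["buah", "fruit", "salad", "pisang", "apel", "jeruk", "mangga", "anggur",
   "semangka", "melon", "pepaya", "nanas", "stroberi", "jambu", "salak",
   "kelengkeng", "leci", "rambutan", "sirsak"]

def pvHIGH : PySem.Set String := PySem.Set.ofList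
  ["goreng", "bakar", "panggang", "crispy", "krispi", "grill", "roast"]

def pvLOW : PySem.Set String := PySem.Set.ofList
  ["rebus", "kukus", "kuah", "sop", "soto", "sayur", "tumis", "semur"]

def pvSTAPLE : PySem.Set String := PySem.Set.ofList
  ["nasi", "telur", "tahu", "tempe", "ayam", "ikan", "daging", "mie", "bakso"]

def normalize_label (label : String) : String :=
  let key := PySem.Str.replace (PySem.Str.replace (PySem.Str.lower (PySem.Str.strip label)) "_" " ") "-" " "
  let words := (PySem.Str.split₀ key).map (fun word => pvTYPO.getD word word)
  PySem.Str.join " " words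

def get_doneness_profile (label : String) : String :=
  let words := PySem.Str.split₀ (normalize_label label)
  if words.any (fun word => PySem.Set.contains pvRAW word) then "raw_ok"
  else if words.any (fun word => PySem.Set.contains pvHIGH word) then "high_brown"
  else if words.any (fun word => PySem.Set.contains pvLOW word) then "light_cooked"
  else if words.any (fun word => PySem.Set.contains pvSTAPLE word) then "light_cooked"
  else "default"

-- ===== PORT B =====
def pvTYPO_alt : PySem.Dict String String := PySem.Dict.ofList [("koll", "kol")]

def pvKEYWORD_RANK : PySem.Dict String Int := PySem.Dict.ofList
  [("buah", 0), ("fruit", 0), ("salad", 0), ("pisang", 0), ("apel", 0), ("jeruk", 0),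
   ("mangga", 0), ("anggur", 0), ("semangka", 0), ("melon", 0), ("pepaya", 0),
   ("nanas", 0), ("stroberi", 0), ("jambu", 0), ("salak", 0), ("kelengkeng", 0),
   ("leci", 0), ("rambutan", 0), ("sirsak", 0),
   ("goreng", 1), ("bakar", 1), ("panggang", 1), ("crispy", 1), ("krispi", 1),
   ("grill", 1), ("roast", 1),
   ("rebus", 2), ("kukus", 2), ("kuah", 2), ("sop", 2), ("soto", 2), ("sayur", 2),
   ("tumis", 2), ("semur", 2),
   ("nasi", 3), ("telur", 3), ("tahu", 3), ("tempe", 3), ("ayam", 3), ("ikan", 3),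
   ("daging", 3), ("mie", 3), ("bakso", 3)]

def normalize_label_alt (label : String) : String :=
  let key := PySem.Str.replace (PySem.Str.replace (PySem.Str.lower (PySem.Str.strip label)) "_" " ") "-" " "
  let words := (PySem.Str.split₀ key).map (fun word => pvTYPO_alt.getD word word)
  PySem.Str.join " " words

def get_doneness_profile_alt (label : String) : String :=
  let best := (PySem.Str.split₀ (normalize_label_alt label)).foldl
    (fun best word => min best (pvKEYWORD_RANK.getD word 4)) (4 : Int)
  if best == 0 then "raw_ok"
  else if best == 1 then "high_brown"
  else if best ≤ 3 then "light_cooked"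
  else "default"

-- ===== PRECONDITION & SPEC =====
def Spec_get_doneness_profile (label : String) (out : String) : Prop := out = get_doneness_profile_alt label
instance (label : String) (out : String) : Decidable (Spec_get_doneness_profile label out) := by unfold Spec_get_doneness_profile; infer_instance

-- ===== CLAIM (what is proved, stated in full; the proofs are below) =====
def Claim_equal_get_doneness_profile : Prop := ∀ (label : String), Dom_get_doneness_profile label → Spec_get_doneness_profile label (get_doneness_profile label)

-- ===== LEMMAS AND PROOFS =====

set_option maxRecDepth 100000

-- rank of a single word, as B computes it
def pvRank (w : String) : Int := pvKEYWORD_RANK.getD w 4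

lemma rank_eq (w : String) :
    pvRank w =
      (if PySem.Set.contains pvRAW w then 0
       else if PySem.Set.contains pvHIGH w then 1
       else if PySem.Set.contains pvLOW w then 2
       else if PySem.Set.contains pvSTAPLE w then 3
       else 4) := by
  by_cases h : w = "buah" ∨ w = "fruit" ∨ w = "salad" ∨ w = "pisang" ∨ w = "apel" ∨ w = "jeruk" ∨ w = "mangga" ∨ w = "anggur" ∨ w = "semangka" ∨ w = "melon" ∨ w = "pepaya" ∨ w = "nanas" ∨ w = "stroberi" ∨ w = "jambu" ∨ w = "salak" ∨ w = "kelengkeng" ∨ w = "leci" ∨ w = "rambutan" ∨ w = "sirsak" ∨ w = "goreng" ∨ w = "bakar" ∨ w = "panggang" ∨ w = "crispy" ∨ w = "krispi" ∨ w = "grill" ∨ w = "roast" ∨ w = "rebus" ∨ w = "kukus" ∨ w = "kuah" ∨ w = "sop" ∨ w = "soto" ∨ w = "sayur" ∨ w = "tumis" ∨ w = "semur" ∨ w = "nasi" ∨ w = "telur" ∨ w = "tahu" ∨ w = "tempe" ∨ w = "ayam" ∨ w = "ikan" ∨ w = "daging" ∨ w = "mie" ∨ w = "bakso"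
  · rcases h with rfl | rfl | rfl | rfl | rfl | rfl | rfl | rfl | rfl | rfl | rfl | rfl | rfl | rfl | rfl | rfl | rfl | rfl | rfl | rfl | rfl | rfl | rfl | rfl | rfl | rfl | rfl | rfl | rfl | rfl | rfl | rfl | rfl | rfl | rfl | rfl | rfl | rfl | rfl | rfl | rfl | rfl | rfl <;> decide
  · push Not at h
    obtain ⟨h1, h2, h3, h4, h5, h6, h7, h8, h9, h10, h11, h12, h13, h14, h15, h16, h17, h18, h19, h20, h21, h22, h23, h24, h25, h26, h27, h28, h29, h30, h31, h32, h33, h34, h35, h36, h37, h38, h39, h40, h41, h42, h43⟩ := h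
    have e : pvKEYWORD_RANK = PySem.Dict.mk [("buah", 0), ("fruit", 0), ("salad", 0), ("pisang", 0), ("apel", 0), ("jeruk", 0), ("mangga", 0), ("anggur", 0), ("semangka", 0), ("melon", 0), ("pepaya", 0), ("nanas", 0), ("stroberi", 0), ("jambu", 0), ("salak", 0), ("kelengkeng", 0), ("leci", 0), ("rambutan", 0), ("sirsak", 0), ("goreng", 1), ("bakar", 1), ("panggang", 1), ("crispy", 1), ("krispi", 1), ("grill", 1), ("roast", 1), ("rebus", 2), ("kukus", 2), ("kuah", 2), ("sop", 2), ("soto", 2), ("sayur", 2), ("tumis", 2), ("semur", 2), ("nasi", 3), ("telur", 3), ("tahu", 3), ("tempe", 3), ("ayam", 3), ("ikan", 3), ("daging", 3), ("mie", 3), ("bakso", 3)] := by decide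
    have e0 : pvRAW = ["buah", "fruit", "salad", "pisang", "apel", "jeruk", "mangga", "anggur", "semangka", "melon", "pepaya", "nanas", "stroberi", "jambu", "salak", "kelengkeng", "leci", "rambutan", "sirsak"] := by decide
    have e1 : pvHIGH = ["goreng", "bakar", "panggang", "crispy", "krispi", "grill", "roast"] := by decide
    have e2 : pvLOW = ["rebus", "kukus", "kuah", "sop", "soto", "sayur", "tumis", "semur"] := by decide
    have e3 : pvSTAPLE = ["nasi", "telur", "tahu", "tempe", "ayam", "ikan", "daging", "mie", "bakso"] := by decide
    unfold pvRank
    rw [e, e0, e1, e2, e3]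
    simp [PySem.Dict.getD_eq_get?_getD, PySem.Dict.get?, PySem.Set.contains,
      h1, h2, h3, h4, h5, h6, h7, h8, h9, h10, h11, h12, h13, h14, h15, h16, h17, h18, h19, h20, h21, h22, h23, h24, h25, h26, h27, h28, h29, h30, h31, h32, h33, h34, h35, h36, h37, h38, h39, h40, h41, h42, h43,
      Ne.symm h1, Ne.symm h2, Ne.symm h3, Ne.symm h4, Ne.symm h5, Ne.symm h6, Ne.symm h7, Ne.symm h8, Ne.symm h9, Ne.symm h10, Ne.symm h11, Ne.symm h12, Ne.symm h13, Ne.symm h14, Ne.symm h15, Ne.symm h16, Ne.symm h17, Ne.symm h18, Ne.symm h19, Ne.symm h20, Ne.symm h21, Ne.symm h22, Ne.symm h23, Ne.symm h24, Ne.symm h25, Ne.symm h26, Ne.symm h27, Ne.symm h28, Ne.symm h29, Ne.symm h30, Ne.symm h31, Ne.symm h32, Ne.symm h33, Ne.symm h34, Ne.symm h35, Ne.symm h36, Ne.symm h37, Ne.symm h38, Ne.symm h39, Ne.symm h40, Ne.symm h41, Ne.symm h42, Ne.symm h43]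

lemma foldl_min_rank (ws : List String) (b : Int) (hb : b ≤ 4) :
    ws.foldl (fun best word => min best (pvRank word)) b
      = min b (ws.foldl (fun best word => min best (pvRank word)) 4) := by
  induction ws generalizing b with
  | nil => simp; omega
  | cons w t ih =>
    simp only [List.foldl_cons]
    rw [ih _ (le_trans (min_le_left _ _) hb), ih _ (min_le_left _ _)]
    omega

lemma fold_char (ws : List String) :
    ws.foldl (fun best word => min best (pvRank word)) 4
      = (if ws.any (fun word => PySem.Set.contains pvRAW word) then 0
         else if ws.any (fun word => PySem.Set.contains pvHIGH word) then 1
         else if ws.any (fun word => PySem.Set.contains pvLOW word) then 2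
         else if ws.any (fun word => PySem.Set.contains pvSTAPLE word) then 3
         else 4) := by
  induction ws with
  | nil => simp
  | cons w t ih =>
    simp only [List.foldl_cons]
    rw [foldl_min_rank t _ (min_le_left _ _), ih]
    have hre := rank_eq w
    simp only [List.any_cons]
    rcases (PySem.Set.contains pvRAW w).eq_false_or_eq_true with hr | hr <;>
      rcases (PySem.Set.contains pvHIGH w).eq_false_or_eq_true with hh | hh <;>
        rcases (PySem.Set.contains pvLOW w).eq_false_or_eq_true with hl | hl <;>
          rcases (PySem.Set.contains pvSTAPLE w).eq_false_or_eq_true with hs | hs <;>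
            simp only [hr, hh, hl, hs, if_true, Bool.false_or, Bool.true_or] at hre ⊢ <;>
            rw [hre] <;> split_ifs <;> simp only [min_def] <;> split_ifs <;> first | omega | simp_all

lemma classify_eq (ws : List String) :
    (if ws.any (fun word => PySem.Set.contains pvRAW word) then "raw_ok"
     else if ws.any (fun word => PySem.Set.contains pvHIGH word) then "high_brown"
     else if ws.any (fun word => PySem.Set.contains pvLOW word) then "light_cooked"
     else if ws.any (fun word => PySem.Set.contains pvSTAPLE word) then "light_cooked"
     else "default")
    = (let best := ws.foldl (fun best word => min best (pvRank word)) (4 : Int)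
       if best == 0 then "raw_ok"
       else if best == 1 then "high_brown"
       else if best ≤ 3 then "light_cooked"
       else "default") := by
  simp only [fold_char ws, beq_iff_eq]
  split_ifs <;> first | rfl | omega

-- ===== VERDICT (by name: the statement is the Claim_ definition above) =====
theorem get_doneness_profile_spec : Claim_equal_get_doneness_profile := by
  intro label _
  unfold Spec_get_doneness_profile get_doneness_profile get_doneness_profile_alt
  have hnorm : normalize_label_alt label = normalize_label label := rfl
  rw [hnorm]
  exact classify_eq (PySem.Str.split₀ (normalize_label label))
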